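-- pv_equiv track=rewrite | github.com/talentinsight/ai-quality-kit | apps/orchestrator/rag_runner.py | _retrieve_contexts
-- ===== SOURCE A (Python) =====
-- from typing import Dict, List, Any, Optional, Tuple
--
-- def _retrieve_contexts(question: str, passages: List[Dict[str, Any]], top_k: int = 3) -> List[str]:
--     """Simple context retrieval based on keyword overlap."""
--     if not passages:
--         return []
--
--     # Simple scoring based on word overlap
--     question_words = set(question.lower().split())
--     scored_passages = []
--
--     for passage in passages:
--         passage_words = set(passage["text"].lower().split())
--         overlap = len(question_words & passage_words)
--         scored_passages.append((overlap, passage["text"]))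
--
--     # Sort by score and return top-k
--     scored_passages.sort(key=lambda x: x[0], reverse=True)
--     return [text for _, text in scored_passages[:top_k]]
-- ===== SOURCE B (Python) =====
-- def _retrieve_contexts(question, passages, top_k=3):
--     """Bucket passages by overlap score (counting-sort style) instead of comparison-sorting."""
--     if not passages:
--         return []
--
--     question_words = set(question.lower().split())
--     buckets = {}
--     max_score = 0
--     for passage in passages:
--         text = passage["text"]
--         passage_words = set(text.lower().split())
--         score = len(question_words & passage_words)
--         buckets.setdefault(score, []).append(text)
--         if score > max_score:
--             max_score = score
--
--     result = []
--     for score in range(max_score + 1):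
--         result = buckets.get(score, []) + result
--     return result[:top_k]
-- ===== Notes on version B (the rewrite author's own statement) =====
-- stated objective: alternative
-- what changed: B replaces A's stable comparison sort of (score, text) pairs by bucketing texts per overlap score in a dict while tracking the max score, then sweeping scores 0..max and prepending each bucket (counting-sort style) before slicing off top_k.
-- outside the precondition, e.g. on _retrieve_contexts('big cat', [{'x': 'y'}], 3): A raises KeyError, B raises KeyError
import Mathlib
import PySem

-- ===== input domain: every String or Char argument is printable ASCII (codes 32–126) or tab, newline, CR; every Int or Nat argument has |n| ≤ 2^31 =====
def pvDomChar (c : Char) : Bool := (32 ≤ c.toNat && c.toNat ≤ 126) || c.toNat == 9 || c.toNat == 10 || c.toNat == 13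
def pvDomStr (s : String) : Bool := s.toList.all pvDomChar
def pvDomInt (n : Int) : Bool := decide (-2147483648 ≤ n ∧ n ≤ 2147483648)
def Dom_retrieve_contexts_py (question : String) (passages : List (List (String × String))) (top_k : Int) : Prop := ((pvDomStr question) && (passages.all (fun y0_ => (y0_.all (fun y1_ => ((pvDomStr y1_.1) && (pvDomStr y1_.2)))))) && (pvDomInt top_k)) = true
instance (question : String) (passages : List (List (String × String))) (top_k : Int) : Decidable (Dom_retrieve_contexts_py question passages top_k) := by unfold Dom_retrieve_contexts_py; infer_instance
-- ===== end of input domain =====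

-- B replaces A's comparison sort with score-keyed buckets swept from low to high score,
-- prepending each bucket (counting-sort style); objective: alternative decomposition, same result.

-- ===== PORT A =====
def retrieve_contexts_py (question : String) (passages : List (List (String × String))) (top_k : Int) : List String :=
  if passages = [] then []
  else
    let question_words : PySem.Set String := PySem.Set.ofList (PySem.Str.split₀ (PySem.Str.lower question))
    let scored_passages : List (Int × String) := passages.foldl (fun acc passage =>
      let text := (PySem.Dict.ofList passage).getD "text" ""
      let passage_words : PySem.Set String := PySem.Set.ofList (PySem.Str.split₀ (PySem.Str.lower text))
      let overlap : Int := ((PySem.Set.inter question_words passage_words).length : Int)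
      acc ++ [(overlap, text)]) []
    let sorted := PySem.List.sorted scored_passages (fun x => x.1) true
    (PySem.List.slice sorted none (some top_k)).map (fun x => x.2)

-- ===== PORT B =====
def retrieve_contexts_py_alt (question : String) (passages : List (List (String × String))) (top_k : Int) : List String :=
  if passages = [] then []
  else
    let question_words : PySem.Set String := PySem.Set.ofList (PySem.Str.split₀ (PySem.Str.lower question))
    let st := passages.foldl (fun (st : PySem.Dict Int (List String) × Int) passage =>
      let text := (PySem.Dict.ofList passage).getD "text" ""
      let passage_words : PySem.Set String := PySem.Set.ofList (PySem.Str.split₀ (PySem.Str.lower text))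
      let score : Int := ((PySem.Set.inter question_words passage_words).length : Int)
      (st.1.modify score [] (fun b => b ++ [text]), if st.2 < score then score else st.2))
      (PySem.Dict.empty, 0)
    let result := (PySem.List.pyRange 0 (st.2 + 1)).foldl (fun acc score => st.1.getD score [] ++ acc) []
    PySem.List.slice result none (some top_k)

-- ===== PRECONDITION & SPEC =====
-- Pre_ excludes passages without a "text" key, on which the Python A raises KeyError.
def Pre_retrieve_contexts_py (question : String) (passages : List (List (String × String))) (top_k : Int) : Prop :=
  ∀ p ∈ passages, "text" ∈ p.map Prod.fst
instance (question : String) (passages : List (List (String × String))) (top_k : Int) : Decidable (Pre_retrieve_contexts_py question passages top_k) := by unfold Pre_retrieve_contexts_py; infer_instance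

def pvWitness_retrieve_contexts_py : String × (List (List (String × String))) × Int :=
  ("big cat", [[("text", "a big dog")], [("text", "cat")]], 2)

def Spec_retrieve_contexts_py (question : String) (passages : List (List (String × String))) (top_k : Int) (out : List String) : Prop := out = retrieve_contexts_py_alt question passages top_k
instance (question : String) (passages : List (List (String × String))) (top_k : Int) (out : List String) : Decidable (Spec_retrieve_contexts_py question passages top_k out) := by unfold Spec_retrieve_contexts_py; infer_instance

-- ===== CLAIM (what is proved, stated in full; the proofs are below) =====
def Claim_equal_retrieve_contexts_py : Prop := ∀ (question : String) (passages : List (List (String × String))) (top_k : Int), Dom_retrieve_contexts_py question passages top_k → Pre_retrieve_contexts_py question passages top_k → Spec_retrieve_contexts_py question passages top_k (retrieve_contexts_py question passages top_k)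

-- ===== LEMMAS AND PROOFS =====

-- inserting past a prefix none of whose elements triggers `before`
lemma insertBy_append_not_before {α : Type} (before : α → α → Bool) (x : α) (as bs : List α)
    (h : ∀ y ∈ as, before x y = false) :
    PySem.List.insertBy before x (as ++ bs) = as ++ PySem.List.insertBy before x bs := by
  induction as with
  | nil => simp
  | cons a as ih =>
    have ha : before x a = false := h a (by simp)
    simp only [List.cons_append, PySem.List.insertBy, ha, Bool.false_eq_true, if_false]
    exact congrArg (a :: ·) (ih (fun y hy => h y (by simp [hy])))

-- a reverse-order insertion into a strictly-descending bucket concatenation appends x to its bucket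
lemma insertBy_buckets {α : Type} (key : α → Int) (x : α) (ss : List Int) (B : Int → List α)
    (hss : ss.Pairwise (· > ·)) (hx : key x ∈ ss) (hB : ∀ s ∈ ss, ∀ y ∈ B s, key y = s) :
    PySem.List.insertBy (fun a b => decide (key b < key a)) x (ss.flatMap B)
      = ss.flatMap (fun s => B s ++ if key x = s then [x] else []) := by
  induction ss with
  | nil => cases hx
  | cons s ss ih =>
    have hgt : ∀ t ∈ ss, s > t := (List.pairwise_cons.mp hss).1
    have hBs : ∀ y ∈ B s, key y = s := hB s (by simp)
    simp only [List.flatMap_cons]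
    by_cases hxs : key x = s
    · -- x belongs to this bucket: skip B s, then x precedes everything after
      have hnot : ∀ y ∈ B s, (decide (key y < key x)) = false := by
        intro y hy; simp [hBs y hy, hxs]
      rw [insertBy_append_not_before _ _ _ _ hnot]
      have hrest : ss.flatMap (fun t => B t ++ if key x = t then [x] else []) = ss.flatMap B := by
        apply List.flatMap_congr
        intro t ht
        have : key x ≠ t := by have := hgt t ht; omega
        simp [this]
      rw [if_pos hxs, hrest]
      cases hfm : ss.flatMap B with
      | nil => simp [PySem.List.insertBy]
      | cons c cs =>
        have hc : key c < key x := by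
          have hcm : c ∈ ss.flatMap B := by rw [hfm]; simp
          obtain ⟨t, ht, hct⟩ := List.mem_flatMap.mp hcm
          have := hB t (by simp [ht]) c hct
          have := hgt t ht
          omega
        simp only [PySem.List.insertBy, decide_eq_true_eq, if_pos hc]
        simp
    · -- x belongs to a later bucket
      have hx' : key x ∈ ss := by
        rcases List.mem_cons.mp hx with h | h
        · exact absurd h hxs
        · exact h
      have hlt : key x < s := by have := hgt _ hx'; omega
      have hnot : ∀ y ∈ B s, (decide (key y < key x)) = false := by
        intro y hy; simp [hBs y hy]; omega
      rw [insertBy_append_not_before _ _ _ _ hnot,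
          ih (List.pairwise_cons.mp hss).2 hx' (fun t ht y hy => hB t (by simp [ht]) y hy)]
      rw [if_neg hxs]
      simp

-- Python's stable reverse sort by an Int key is the concatenation of its score buckets,
-- taken along any strictly-descending list of scores covering all keys
lemma sorted_rev_buckets {α : Type} (key : α → Int) (L : List α) (ss : List Int)
    (hss : ss.Pairwise (· > ·)) (hall : ∀ y ∈ L, key y ∈ ss) :
    PySem.List.sorted L key true = ss.flatMap (fun s => L.filter (fun y => key y == s)) := by
  induction L using List.reverseRecOn with
  | nil => simp [PySem.List.sorted]
  | append_singleton L x ih =>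
    rw [PySem.List.sorted_rev_eq_foldl_insertBy, List.foldl_append, List.foldl_cons, List.foldl_nil,
        ← PySem.List.sorted_rev_eq_foldl_insertBy,
        ih (fun y hy => hall y (by simp [hy]))]
    rw [insertBy_buckets key x ss _ hss (hall x (by simp))
        (fun s hs y hy => by simpa using (List.mem_filter.mp hy).2)]
    apply List.flatMap_congr
    intro s hs
    by_cases hxs : key x = s <;> simp [List.filter_append, hxs]

-- B's prepending sweep is a flatMap over the reversed range
lemma foldl_prepend {α β : Type} (g : α → List β) (l : List α) (acc : List β) :
    l.foldl (fun acc s => g s ++ acc) acc = l.reverse.flatMap g ++ acc := by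
  induction l generalizing acc with
  | nil => simp
  | cons a l ih => simp [ih]

lemma pyRange_zero_pairwise_gt (b : Int) :
    (PySem.List.pyRange 0 b).reverse.Pairwise (· > ·) := by
  rw [List.pairwise_reverse]
  by_cases hb : 0 ≤ b
  · have : b = ((b.toNat : Nat) : Int) := by omega
    rw [this, PySem.List.pyRange_zero_natCast]
    exact List.pairwise_lt_range.map _ (by intro a b h; exact_mod_cast h)
  · have : PySem.List.pyRange 0 b = [] := by
      rw [List.eq_nil_iff_forall_not_mem]
      intro x hx
      have := PySem.List.mem_pyRange_one.mp hx
      omega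
    simp [this]

lemma map_slice {α β : Type} (f : α → β) (xs : List α) (a? b? : Option Int) :
    (PySem.List.slice xs a? b?).map f = PySem.List.slice (xs.map f) a? b? := by
  cases a? <;> cases b? <;> simp [PySem.List.slice, List.map_take, List.map_drop]

-- ===== VERDICT (by name: the statement is the Claim_ definition above) =====
theorem retrieve_contexts_py_spec : Claim_equal_retrieve_contexts_py := by
  intro question passages top_k _ _
  unfold Spec_retrieve_contexts_py
  by_cases hp : passages = []
  · simp [retrieve_contexts_py, retrieve_contexts_py_alt, hp]
  · simp only [retrieve_contexts_py, retrieve_contexts_py_alt, if_neg hp]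
    set qw : PySem.Set String := PySem.Set.ofList (PySem.Str.split₀ (PySem.Str.lower question)) with hqw
    set tx : List (String × String) → String := fun passage => (PySem.Dict.ofList passage).getD "text" "" with htx
    set sc : List (String × String) → Int := fun passage =>
      ((PySem.Set.inter qw (PySem.Set.ofList (PySem.Str.split₀ (PySem.Str.lower (tx passage))))).length : Int) with hsc
    -- A's scored list
    rw [PySem.List.foldl_append_singleton_eq_map (f := fun p => (sc p, tx p)), List.nil_append]
    -- B's paired fold splits into two independent folds
    rw [PySem.List.foldl_prod_mk
          (f := fun (d : PySem.Dict Int (List String)) p => d.modify (sc p) [] (fun b => b ++ [tx p]))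
          (g := fun (m : Int) p => if m < sc p then sc p else m)]
    set L : List (Int × String) := passages.map (fun p => (sc p, tx p)) with hL
    set D : PySem.Dict Int (List String) :=
      passages.foldl (fun d p => d.modify (sc p) [] (fun b => b ++ [tx p])) PySem.Dict.empty with hD
    set M : Int := passages.foldl (fun m p => if m < sc p then sc p else m) 0 with hM
    -- the max accumulator is a running max
    have hMmax : M = passages.foldl (fun m p => max m (sc p)) 0 := by
      rw [hM]
      apply PySem.List.foldl_congr_mem
      intro acc x _
      rw [max_def]
      split_ifs <;> omega
    have hM0 : 0 ≤ M := by rw [hMmax]; exact (PySem.List.le_foldl_max_int passages sc 0).1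
    have hMub : ∀ p ∈ passages, sc p ≤ M := by rw [hMmax]; exact (PySem.List.le_foldl_max_int passages sc 0).2
    -- bucket lookup = filter of the scored list
    have hbucket : ∀ s : Int, D.getD s [] = (L.filter (fun y => y.1 == s)).map (fun y => y.2) := by
      intro s
      have : D = L.foldl (fun d q => d.modify q.1 [] (fun b => b ++ [q.2])) PySem.Dict.empty := by
        rw [hD, hL, List.foldl_map]
      rw [this, PySem.Dict.getD_foldl_modify_append, PySem.Dict.getD_empty, List.nil_append]
    -- B's sweep is a flatMap over the descending score list
    rw [foldl_prepend, List.append_nil]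
    set ss : List Int := (PySem.List.pyRange 0 (M + 1)).reverse with hss
    have hpw : ss.Pairwise (· > ·) := pyRange_zero_pairwise_gt (M + 1)
    have hall : ∀ y ∈ L, y.1 ∈ ss := by
      intro y hy
      rw [hL] at hy
      obtain ⟨p, hpmem, rfl⟩ := List.mem_map.mp hy
      rw [hss, List.mem_reverse, PySem.List.mem_pyRange_one]
      have h1 : (0:Int) ≤ sc p := by rw [hsc]; positivity
      have h2 := hMub p hpmem
      simp only
      omega
    rw [map_slice, sorted_rev_buckets (fun y => y.1) L ss hpw hall, List.map_flatMap]
    congr 1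
    apply List.flatMap_congr
    intro s _
    show _ = D.getD s []
    rw [hbucket s]
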